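-- pv_equiv track=rewrite | github.com/MarcPartensky/TIPE-P1A | outils.py | arrangementsConsecutifs
-- ===== SOURCE A (Python) =====
-- def arrangementsConsecutifs(liste,n): #todo mieux expliciter ce que fait cette fonction (ajouter des exemples)
--     """Renvoie la liste des arrangements consécutifs de taille n."""
--     arrangements=[]
--     for i in range(len(liste)):
--         arrangement=[]
--         for j in range(n):
--             arrangement.append(liste[(i+j)%n])
--         arrangements.append(arrangement)
--     return arrangements
-- ===== SOURCE B (Python) =====
-- def arrangementsConsecutifs(liste, n):
--     """Renvoie la liste des arrangements consecutifs de taille n."""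
--     if not liste:
--         return []
--     current = [liste[k] for k in range(n)]
--     arrangements = []
--     for _ in liste:
--         arrangements.append(current)
--         current = current[1:] + current[:1]
--     return arrangements
-- ===== Notes on version B (the rewrite author's own statement) =====
-- stated objective: alternative
-- what changed: B builds the length-n base window once and emits each row by rotating that carried window one step per input position (slice concatenation), eliminating A's nested loop with per-element (i+j)%n index arithmetic.
import Mathlib
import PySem

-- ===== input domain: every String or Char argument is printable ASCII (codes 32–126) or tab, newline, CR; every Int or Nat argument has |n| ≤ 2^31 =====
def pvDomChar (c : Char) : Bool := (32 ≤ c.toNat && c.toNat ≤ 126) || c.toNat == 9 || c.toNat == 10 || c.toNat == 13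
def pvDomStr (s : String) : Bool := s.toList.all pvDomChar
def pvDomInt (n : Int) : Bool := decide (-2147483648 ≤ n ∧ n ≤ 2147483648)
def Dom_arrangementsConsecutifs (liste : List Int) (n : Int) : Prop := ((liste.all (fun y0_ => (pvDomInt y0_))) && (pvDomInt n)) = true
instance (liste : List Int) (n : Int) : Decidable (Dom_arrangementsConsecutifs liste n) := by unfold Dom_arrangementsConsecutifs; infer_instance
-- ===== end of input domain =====

-- B replaces A's nested (i+j)%n index arithmetic by a single pass that rotates a carried window one step per row (alternative decomposition, same cost class).

-- ===== PORT A =====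
def arrangementsConsecutifs (liste : List Int) (n : Int) : List (List Int) :=
  (PySem.List.pyRange 0 (liste.length : Int) 1).foldl
    (fun arrangements i =>
      arrangements ++ [(PySem.List.pyRange 0 n 1).foldl
        (fun arrangement j =>
          arrangement ++ [PySem.List.pyGetD liste (PySem.Int.mod (i + j) n) 0]) []])
    []

-- ===== PORT B =====
def arrangementsConsecutifs_alt (liste : List Int) (n : Int) : List (List Int) :=
  if liste = [] then []
  else
    (liste.foldl
      (fun (st : List (List Int) × List Int) _ =>
        (st.1 ++ [st.2],
         PySem.List.slice st.2 (some 1) none ++ PySem.List.slice st.2 none (some 1)))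
      ([], (PySem.List.pyRange 0 n 1).map (fun k => PySem.List.pyGetD liste k 0))).1

-- ===== PRECONDITION & SPEC =====
-- Pre_ excludes exactly the inputs where Python A raises IndexError: a nonempty liste with n > len(liste).
def Pre_arrangementsConsecutifs (liste : List Int) (n : Int) : Prop :=
  liste = [] ∨ n ≤ (liste.length : Int)
instance (liste : List Int) (n : Int) : Decidable (Pre_arrangementsConsecutifs liste n) := by
  unfold Pre_arrangementsConsecutifs; infer_instance

def pvWitness_arrangementsConsecutifs : List Int × Int := ([1, 2, 3], 2)

def Spec_arrangementsConsecutifs (liste : List Int) (n : Int) (out : List (List Int)) : Prop := out = arrangementsConsecutifs_alt liste n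
instance (liste : List Int) (n : Int) (out : List (List Int)) : Decidable (Spec_arrangementsConsecutifs liste n out) := by unfold Spec_arrangementsConsecutifs; infer_instance

-- ===== CLAIM (what is proved, stated in full; the proofs are below) =====
def Claim_equal_arrangementsConsecutifs : Prop := ∀ (liste : List Int) (n : Int), Dom_arrangementsConsecutifs liste n → Pre_arrangementsConsecutifs liste n → Spec_arrangementsConsecutifs liste n (arrangementsConsecutifs liste n)

-- ===== LEMMAS AND PROOFS =====

-- one rotation step of B equals List.rotate _ 1
lemma slice_rot_eq_rotate (x : List Int) :
    PySem.List.slice x (some 1) none ++ PySem.List.slice x none (some 1) = x.rotate 1 := by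
  rw [PySem.List.slice_from_one, PySem.List.slice_to x (by norm_num)]
  cases x with
  | nil => rfl
  | cons a l => simp [List.rotate_cons_succ]

-- B's fold produces the successive rotations of the carried window
lemma b_fold_rotations (l : List Int) (acc : List (List Int)) (cur : List Int) :
    (l.foldl
      (fun (st : List (List Int) × List Int) _ =>
        (st.1 ++ [st.2],
         PySem.List.slice st.2 (some 1) none ++ PySem.List.slice st.2 none (some 1)))
      (acc, cur)).1
    = acc ++ (List.range l.length).map (fun i => cur.rotate i) := by
  induction l generalizing acc cur with
  | nil => simp
  | cons x xs ih =>
      rw [List.foldl_cons, ih, slice_rot_eq_rotate]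
      simp [List.range_succ_eq_map, List.rotate_rotate, Function.comp_def, Nat.add_comm]

-- rotating the base window by i is exactly A's modular row
lemma rotate_base_eq_row (liste : List Int) (m : Nat) (i : Nat) :
    ((List.range m).map (fun (k : Nat) => liste.getD k 0)).rotate i
      = (List.range m).map (fun (j : Nat) => liste.getD ((i + j) % m) 0) := by
  rcases Nat.eq_zero_or_pos m with h0 | hpos
  · subst h0; simp
  apply List.ext_getElem
  · simp
  intro j h1 h2
  have hbl : ((List.range m).map (fun k => liste.getD k 0)).length = m := by simp
  rw [List.getElem_rotate]
  simp only [List.getElem_map, List.getElem_range, hbl]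
  rw [Nat.add_comm j i]

-- A's result in closed form
lemma a_closed (liste : List Int) (n : Int) :
    arrangementsConsecutifs liste n
      = (List.range liste.length).map (fun (i : Nat) =>
          (List.range n.toNat).map (fun (j : Nat) =>
            PySem.List.pyGetD liste (PySem.Int.mod ((i : Int) + (j : Int)) n) 0)) := by
  unfold arrangementsConsecutifs
  simp only [PySem.List.foldl_append_singleton_eq_map, PySem.List.pyRange_one,
    List.map_map, Int.zero_add, Int.sub_zero, Int.toNat_natCast, List.nil_append,
    Function.comp_def]

-- B's result in closed form (nonempty liste)
lemma b_closed (liste : List Int) (n : Int) (hne : liste ≠ []) :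
    arrangementsConsecutifs_alt liste n
      = (List.range liste.length).map (fun (i : Nat) =>
          ((List.range n.toNat).map (fun (k : Nat) => liste.getD k 0)).rotate i) := by
  unfold arrangementsConsecutifs_alt
  rw [if_neg hne, b_fold_rotations, List.nil_append]
  have hbase : (PySem.List.pyRange 0 n 1).map (fun k => PySem.List.pyGetD liste k 0)
      = (List.range n.toNat).map (fun (k : Nat) => liste.getD k 0) := by
    simp only [PySem.List.pyRange_one, List.map_map, Int.sub_zero, Function.comp_def,
      Int.zero_add, PySem.List.pyGetD_natCast]
  rw [hbase]

-- ===== VERDICT (by name: the statement is the Claim_ definition above) =====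
theorem arrangementsConsecutifs_spec : Claim_equal_arrangementsConsecutifs := by
  intro liste n _ hpre
  unfold Spec_arrangementsConsecutifs
  rcases eq_or_ne liste [] with hnil | hne
  · subst hnil
    simp [a_closed, arrangementsConsecutifs_alt]
  rw [a_closed, b_closed liste n hne]
  apply List.map_congr_left
  intro i _
  rw [rotate_base_eq_row]
  apply List.map_congr_left
  intro j hj
  have hjm : j < n.toNat := List.mem_range.mp hj
  have hn : 0 < n := by omega
  have hmod : PySem.Int.mod ((i : Int) + (j : Int)) n = (((i + j) % n.toNat : Nat) : Int) := by
    have hcast : n = ((n.toNat : Nat) : Int) := by omega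
    rw [hcast]
    push_cast
    exact_mod_cast PySem.Int.mod_natCast (i + j) n.toNat
  rw [hmod, PySem.List.pyGetD_natCast]
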